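-- pv_equiv track=rewrite | github.com/rjames187/Leetcode-solutions | basicRecursionProblems.py | array11
-- ===== SOURCE A (Python) =====
-- def array11(nums, index):
--     if len(nums) < 1:
--         return 0
--     elif index == len(nums) - 1:
--         if nums[index] == 11:
--             return 1
--         else:
--             return 0
--     else:
--         if nums[index] == 11:
--             return 1 + array11(nums, index + 1)
--         else:
--             return array11(nums, index + 1)
-- ===== SOURCE B (Python) =====
-- def array11(nums, index):
--     if len(nums) < 1:
--         return 0
--     count = 0
--     i = index
--     while True:
--         if nums[i] == 11:
--             count += 1
--         if i == len(nums) - 1: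
--             return count
--         i += 1
-- ===== Notes on version B (the rewrite author's own statement) =====
-- stated objective: alternative
-- what changed: Replaced A's non-tail recursion (which allocates a Python stack frame per element) by an explicit while-loop with a running count, stepping the index one-by-one exactly as A does.
import Mathlib
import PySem

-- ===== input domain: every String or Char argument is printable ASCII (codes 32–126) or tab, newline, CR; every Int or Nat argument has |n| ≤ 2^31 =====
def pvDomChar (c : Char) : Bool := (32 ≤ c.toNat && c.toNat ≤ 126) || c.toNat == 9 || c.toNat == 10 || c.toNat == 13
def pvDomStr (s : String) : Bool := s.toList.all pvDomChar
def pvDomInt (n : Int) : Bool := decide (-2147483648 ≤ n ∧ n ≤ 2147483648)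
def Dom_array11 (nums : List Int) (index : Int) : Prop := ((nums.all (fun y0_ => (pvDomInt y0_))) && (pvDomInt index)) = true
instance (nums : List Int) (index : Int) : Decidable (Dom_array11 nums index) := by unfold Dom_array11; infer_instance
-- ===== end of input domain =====

-- B replaces A's non-tail recursion by an explicit while-loop with a running count (same stepping, O(1) space).

-- ===== PORT A =====
-- literal port of A's recursion; 'none' from pyGet? is Python's IndexError (outside Pre_), ported as 0
def array11 (nums : List Int) (index : Int) : Int :=
  if nums.length < 1 then 0
  else if index = (nums.length : Int) - 1 then
    match PySem.List.pyGet? nums index with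
    | none => 0
    | some v => if v = 11 then 1 else 0
  else
    match h : PySem.List.pyGet? nums index with
    | none => 0
    | some v => if v = 11 then 1 + array11 nums (index + 1) else array11 nums (index + 1)
termination_by ((nums.length : Int) - index).toNat
decreasing_by
  all_goals
    have hr : PySem.Raise.InRange nums.length index := by
      by_contra hc
      rw [← PySem.List.pyGet?_eq_none_iff] at hc
      simp [hc] at h
    unfold PySem.Raise.InRange at hr
    omega

-- ===== PORT B =====
-- the while-loop of Source B: i and count are the loop state; 'none' = Python IndexError (outside Pre_)
def array11AltGo (nums : List Int) (i : Int) (count : Int) : Int :=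
  match h : PySem.List.pyGet? nums i with
  | none => count
  | some v =>
    if i = (nums.length : Int) - 1 then (if v = 11 then count + 1 else count)
    else array11AltGo nums (i + 1) (if v = 11 then count + 1 else count)
termination_by ((nums.length : Int) - i).toNat
decreasing_by
  have hr : PySem.Raise.InRange nums.length i := by
    by_contra hc
    rw [← PySem.List.pyGet?_eq_none_iff] at hc
    simp [hc] at h
  unfold PySem.Raise.InRange at hr
  omega

def array11_alt (nums : List Int) (index : Int) : Int :=
  if nums.length < 1 then 0 else array11AltGo nums index 0

-- ===== PRECONDITION & SPEC =====
-- Pre_ excludes exactly the inputs where A (and B) raise IndexError: a non-empty list with index out of Python's range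
def Pre_array11 (nums : List Int) (index : Int) : Prop :=
  nums = [] ∨ PySem.Raise.InRange nums.length index
instance (nums : List Int) (index : Int) : Decidable (Pre_array11 nums index) := by
  unfold Pre_array11; infer_instance
def pvWitness_array11 : List Int × Int := ([11, 2, 11], 0)

def Spec_array11 (nums : List Int) (index : Int) (out : Int) : Prop := out = array11_alt nums index
instance (nums : List Int) (index : Int) (out : Int) : Decidable (Spec_array11 nums index out) := by unfold Spec_array11; infer_instance

-- ===== CLAIM (what is proved, stated in full; the proofs are below) =====
def Claim_equal_array11 : Prop := ∀ (nums : List Int) (index : Int), Dom_array11 nums index → Pre_array11 nums index → Spec_array11 nums index (array11 nums index)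

-- ===== LEMMAS AND PROOFS =====
theorem array11AltGo_eq (nums : List Int) (i c : Int) :
    PySem.Raise.InRange nums.length i →
    array11AltGo nums i c = c + array11 nums i := by
  fun_induction array11AltGo nums i c with
  | case1 i c h =>
    intro hr
    rw [PySem.List.pyGet?_eq_none_iff] at h
    exact absurd hr h
  | case2 c h =>
    intro hr
    unfold PySem.Raise.InRange at hr
    have hlen : ¬ nums.length < 1 := by omega
    rw [array11, if_neg hlen, if_pos rfl]
    split
    · rename_i heq
      rw [h] at heq
      cases heq
    · rename_i v' heq
      rw [h] at heq
      injection heq with hv'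
      subst hv'
      split <;> omega
  | case3 c v hv h =>
    intro hr
    unfold PySem.Raise.InRange at hr
    have hlen : ¬ nums.length < 1 := by omega
    rw [array11, if_neg hlen, if_pos rfl]
    split
    · rename_i heq
      rw [h] at heq
      cases heq
    · rename_i v' heq
      rw [h] at heq
      injection heq with hv'
      subst hv'
      split <;> omega
  | case4 i c v h hlast ih =>
    intro hr
    unfold PySem.Raise.InRange at hr
    have hr' : PySem.Raise.InRange nums.length (i + 1) := by
      unfold PySem.Raise.InRange; omega
    have hlen : ¬ nums.length < 1 := by omega
    have hA : array11 nums i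
        = if v = 11 then 1 + array11 nums (i + 1) else array11 nums (i + 1) := by
      rw [array11, if_neg hlen, if_neg hlast]
      split
      · rename_i heq
        rw [h] at heq
        cases heq
      · rename_i v' heq
        rw [h] at heq
        injection heq with hv'
        subst hv'
        rfl
    rw [hA]
    by_cases hv : v = 11
    · simp only [if_pos hv, dif_pos hv] at ih ⊢
      rw [ih hr']
      omega
    · simp only [if_neg hv, dif_neg hv] at ih ⊢
      exact ih hr'

-- ===== VERDICT (by name: the statement is the Claim_ definition above) =====
theorem array11_spec : Claim_equal_array11 := by
  intro nums index _ hpre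
  unfold Spec_array11 array11_alt
  rcases hpre with h | h
  · subst h; rw [array11]; simp
  · have hlen : ¬ nums.length < 1 := by
      unfold PySem.Raise.InRange at h; omega
    rw [if_neg hlen, array11AltGo_eq nums index 0 h]
    omega
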